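-- pv_equiv track=rewrite | github.com/haofeng0928/myFunctions | exam/huawei.py | newMerge
-- ===== SOURCE A (Python) =====
-- def newMerge(lenth, lines):
--     lines_len = len(lines)
--     result = []
--
--     # 进入循环
--     count = 1
--     while count > 0:
--
--         # 遍历每行数组
--         for i in range(len(lines)):
--
--             # 第i行数组的长度
--             len_ = len(lines[i])
--
--             for j in range(min(lenth, len_)):
--                 # 依次添加min(lenth, len_)个元素，同时删除添加过的元素
--                 result.append(lines[i][0])
--                 del lines[i][0]
--
--         # 统计数组中元素个数
--         count = 0
--         for m in range(len(lines)):
--             for n in range(len(lines[m])):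
--                 count += 1
--
--     return result
-- ===== SOURCE B (Python) =====
-- def newMerge(lenth, lines):
--     # Round-robin flatten in chunks of `lenth`, by direct slice indexing per round
--     # (no mutation of `lines`, unlike the original which empties every row).
--     max_len = 0
--     for row in lines:
--         if len(row) > max_len:
--             max_len = len(row)
--     num_rounds = -(-max_len // lenth) if lenth > 0 else 0
--     result = []
--     for r in range(num_rounds):
--         for row in lines:
--             result.extend(row[r * lenth:(r + 1) * lenth])
--     return result
-- ===== Notes on version B (the rewrite author's own statement) =====
-- stated objective: faster
-- what changed: Replaces the while-until-empty loop that repeatedly pops element 0 (a linear shift each time) and recounts all remaining elements every pass with a precomputed number of rounds (ceil(max row length / lenth)) and direct slicing row[r*lenth:(r+1)*lenth]; B does not mutate lines (A empties every row in place), equivalence is about the return value.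
import Mathlib
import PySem

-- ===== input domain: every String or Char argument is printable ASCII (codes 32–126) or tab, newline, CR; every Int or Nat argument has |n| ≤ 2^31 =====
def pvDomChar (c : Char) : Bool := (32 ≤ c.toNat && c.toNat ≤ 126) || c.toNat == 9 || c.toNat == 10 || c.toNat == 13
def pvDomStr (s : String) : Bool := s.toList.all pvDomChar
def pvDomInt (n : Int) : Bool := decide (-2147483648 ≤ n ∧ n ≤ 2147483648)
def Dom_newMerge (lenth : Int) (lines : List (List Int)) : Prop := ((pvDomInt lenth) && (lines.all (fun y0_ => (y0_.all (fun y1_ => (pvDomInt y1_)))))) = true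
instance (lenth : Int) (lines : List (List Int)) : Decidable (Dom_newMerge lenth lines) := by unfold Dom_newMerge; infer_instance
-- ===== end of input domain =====

-- B replaces A's while-until-empty pop-and-recount loop by a precomputed round count and
-- direct slicing per round (simpler); A empties every inner list in place, B does not mutate
-- `lines` — the equivalence proved here is about the RETURN value only.


-- ===== PORT A =====
-- One iteration of A's while-body: for each row pop min(lenth, len(row)) elements from the
-- front (appending them to result), then recount; loop while the count is positive.
-- The while loop is ported with fuel: with lenth ≥ 1 each iteration that continues removes at
-- least one element, so (total number of elements)+1 iterations always suffice; on lenth ≤ 0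
-- with a nonempty row the Python diverges (excluded by Pre_newMerge).
def newMergeLoop (lenth : Int) : Nat → List (List Int) → List Int → List Int
  | 0, _, result => result
  | fuel+1, lines, result =>
    -- range(min(lenth, len_)) runs (min lenth len_).toNat times (empty if negative)
    let pairs := lines.map (fun row =>
      (row.take (min lenth (row.length : Int)).toNat, row.drop (min lenth (row.length : Int)).toNat))
    let result := result ++ pairs.flatMap Prod.fst
    let lines := pairs.map Prod.snd
    let count := (lines.map List.length).sum
    if 0 < count then newMergeLoop lenth fuel lines result else result

def newMerge (lenth : Int) (lines : List (List Int)) : List Int :=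
  newMergeLoop lenth ((lines.map List.length).sum + 1) lines []

-- ===== PORT B =====
def newMerge_alt (lenth : Int) (lines : List (List Int)) : List Int :=
  let maxLen : Int := lines.foldl (fun m row => if m < (row.length : Int) then (row.length : Int) else m) 0
  let numRounds : Int := if 0 < lenth then -(PySem.Int.floordiv (-maxLen) lenth) else 0
  (PySem.List.pyRange 0 numRounds 1).foldl
    (fun res r => lines.foldl
      (fun res row => res ++ PySem.List.slice row (some (r * lenth)) (some ((r + 1) * lenth))) res) []

-- ===== PRECONDITION & SPEC =====
-- Pre_ excludes exactly the inputs on which Python A never returns: lenth ≤ 0 together with a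
-- nonempty row makes A's while loop remove nothing and spin forever.
def Pre_newMerge (lenth : Int) (lines : List (List Int)) : Prop :=
  1 ≤ lenth ∨ ∀ row ∈ lines, row = []
instance (lenth : Int) (lines : List (List Int)) : Decidable (Pre_newMerge lenth lines) := by
  unfold Pre_newMerge; infer_instance

def pvWitness_newMerge : Int × List (List Int) := (2, [[1, 2, 3], [4]])

def Spec_newMerge (lenth : Int) (lines : List (List Int)) (out : List Int) : Prop := out = newMerge_alt lenth lines
instance (lenth : Int) (lines : List (List Int)) (out : List Int) : Decidable (Spec_newMerge lenth lines out) := by unfold Spec_newMerge; infer_instance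

-- ===== CLAIM (what is proved, stated in full; the proofs are below) =====
def Claim_equal_newMerge : Prop := ∀ (lenth : Int) (lines : List (List Int)), Dom_newMerge lenth lines → Pre_newMerge lenth lines → Spec_newMerge lenth lines (newMerge lenth lines)

-- ===== LEMMAS AND PROOFS =====

-- max row length, the Nat version used by the proofs
def mxN (lines : List (List Int)) : Nat := lines.foldr (fun row m => max row.length m) 0

lemma maxfold (lines : List (List Int)) (a : Int) (ha : 0 ≤ a) :
    lines.foldl (fun m row => if m < (row.length : Int) then (row.length : Int) else m) a
      = max a (mxN lines : Int) := by
  induction lines generalizing a with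
  | nil => simp [mxN]; omega
  | cons row t ih =>
    simp only [List.foldl_cons, mxN, List.foldr_cons]
    have h1 : (if a < (row.length : Int) then (row.length : Int) else a) = max a (row.length : Int) := by
      split <;> omega
    rw [h1, ih _ (by omega)]
    have hmx : mxN t = List.foldr (fun row m => max row.length m) 0 t := rfl
    rw [hmx]
    push_cast
    omega

lemma mxN_drop (K : Nat) (lines : List (List Int)) :
    mxN (lines.map (fun row => row.drop K)) = mxN lines - K := by
  induction lines with
  | nil => simp [mxN]
  | cons row t ih =>
    simp only [mxN, List.map_cons, List.foldr_cons, List.length_drop] at *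
    omega

lemma mxN_zero_of_sum_zero (lines : List (List Int)) (h : (lines.map List.length).sum = 0) :
    mxN lines = 0 := by
  induction lines with
  | nil => simp [mxN]
  | cons row t ih =>
    simp only [mxN, List.foldr_cons, List.map_cons, List.sum_cons] at *
    have := ih (by omega)
    simp at this
    omega

lemma length_le_mxN (lines : List (List Int)) (row : List Int) (hrow : row ∈ lines) :
    row.length ≤ mxN lines := by
  induction lines with
  | nil => simp at hrow
  | cons h t ih =>
    rcases List.mem_cons.mp hrow with heq | hmem
    · simp only [mxN, List.foldr_cons]; rw [heq]; omega
    · have := ih hmem; simp only [mxN, List.foldr_cons] at *; omega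

lemma alt_eq_flatMap (lenth : Int) (lines : List (List Int)) :
    newMerge_alt lenth lines =
      (PySem.List.pyRange 0
          (if 0 < lenth then -(PySem.Int.floordiv (-(mxN lines : Int)) lenth) else 0) 1).flatMap
        (fun r => lines.flatMap
          (fun row => PySem.List.slice row (some (r * lenth)) (some ((r + 1) * lenth)))) := by
  unfold newMerge_alt
  rw [maxfold lines 0 le_rfl, max_eq_right (Int.natCast_nonneg _)]
  rw [PySem.List.foldl_congr_mem (g := fun res r => res ++
      lines.flatMap (fun row => PySem.List.slice row (some (r * lenth)) (some ((r + 1) * lenth))))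
      (h := by
        intro acc x _
        rw [PySem.List.foldl_append_eq_flatMap])]
  rw [PySem.List.foldl_append_eq_flatMap]
  simp

lemma numRounds_eq (lenth : Int) (hl : 1 ≤ lenth) (m : Nat) (q : Int)
    (h1 : (q - 1) * lenth < (m : Int)) (h2 : (m : Int) ≤ q * lenth) :
    -(PySem.Int.floordiv (-(m : Int)) lenth) = q := by
  rw [PySem.Int.neg_floordiv_neg_eq_iff_of_pos (by omega)]
  exact ⟨h1, h2⟩

lemma alt_nil_of_sum_zero (lenth : Int) (lines : List (List Int))
    (h : (lines.map List.length).sum = 0) : newMerge_alt lenth lines = [] := by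
  rw [alt_eq_flatMap, mxN_zero_of_sum_zero lines h]
  by_cases hl : 0 < lenth
  · rw [if_pos hl]
    have : -(PySem.Int.floordiv (-((0 : Nat) : Int)) lenth) = 0 :=
      numRounds_eq lenth (by omega) 0 0 (by simp; omega) (by simp)
    simp only [Nat.cast_zero] at this ⊢
    rw [this, PySem.List.pyRange_one_eq_nil le_rfl, List.flatMap_nil]
  · rw [if_neg hl, PySem.List.pyRange_one_eq_nil le_rfl, List.flatMap_nil]

lemma take_min (K : Nat) (row : List Int) : row.take (min K row.length) = row.take K := by
  rcases le_total K row.length with h | h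
  · simp [Nat.min_eq_left h]
  · simp [Nat.min_eq_right h, List.take_of_length_le h]

lemma drop_min (K : Nat) (row : List Int) : row.drop (min K row.length) = row.drop K := by
  rcases le_total K row.length with h | h
  · simp [Nat.min_eq_left h]
  · simp [Nat.min_eq_right h, List.drop_of_length_le h]

lemma slice_shift (lenth : Int) (hl : 1 ≤ lenth) (row : List Int) (k : Nat) :
    PySem.List.slice row (some ((1 + (k : Int)) * lenth)) (some ((1 + (k : Int) + 1) * lenth))
      = PySem.List.slice (row.drop lenth.toNat)
          (some (((k : Int)) * lenth)) (some (((k : Int) + 1) * lenth)) := by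
  set K := lenth.toNat with hK
  have hlen : lenth = (K : Int) := by omega
  have e1 : (1 + (k : Int)) * lenth = (((1 + k) * K : Nat) : Int) := by rw [hlen]; push_cast; ring
  have e2 : (1 + (k : Int) + 1) * lenth = (((2 + k) * K : Nat) : Int) := by rw [hlen]; push_cast; ring
  have e3 : ((k : Int)) * lenth = ((k * K : Nat) : Int) := by rw [hlen]; push_cast; ring
  have e4 : ((k : Int) + 1) * lenth = (((k + 1) * K : Nat) : Int) := by rw [hlen]; push_cast; ring
  rw [e1, e2, e3, e4, PySem.List.slice_natCast, PySem.List.slice_natCast, List.drop_drop]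
  have d1 : K + k * K = (1 + k) * K := by ring
  have t1 : (2 + k) * K - (1 + k) * K = K := by
    have : (2 + k) * K = (1 + k) * K + K := by ring
    omega
  have t2 : (k + 1) * K - k * K = K := by
    have : (k + 1) * K = k * K + K := by ring
    omega
  rw [d1, t1, t2]

-- the central step lemma: B on lines = first round ++ B on the rows with the first chunk dropped
lemma alt_step (lenth : Int) (hl : 1 ≤ lenth) (lines : List (List Int)) :
    newMerge_alt lenth lines =
      lines.flatMap (fun row => row.take lenth.toNat)
        ++ newMerge_alt lenth (lines.map (fun row => row.drop lenth.toNat)) := by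
  set K := lenth.toNat with hK
  have hlpos : (0 : Int) < lenth := by omega
  rw [alt_eq_flatMap, alt_eq_flatMap, mxN_drop K lines, if_pos hlpos, if_pos hlpos]
  set m := mxN lines with hm
  by_cases hm0 : m = 0
  · -- all rows empty: both sides are []
    have hall : ∀ row ∈ lines, row = [] := by
      intro row hrow
      have hle : row.length ≤ m := hm ▸ length_le_mxN lines row hrow
      rw [hm0] at hle
      exact List.eq_nil_of_length_eq_zero (by omega)
    have hz : -(PySem.Int.floordiv (-((0 : Nat) : Int)) lenth) = 0 :=
      numRounds_eq lenth hl 0 0 (by simp; omega) (by simp)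
    simp only [Nat.cast_zero] at hz
    rw [hm0]
    simp only [Nat.zero_sub, Nat.cast_zero, hz,
      PySem.List.pyRange_one_eq_nil (le_refl (0:Int)), List.flatMap_nil]
    rw [List.flatMap_eq_nil_iff.mpr (by intro row hrow; rw [hall row hrow]; simp)]
    simp
  · -- some row nonempty: peel round 0
    set N := -(PySem.Int.floordiv (-(m : Int)) lenth) with hN
    have hNb : (N - 1) * lenth < (m : Int) ∧ (m : Int) ≤ N * lenth := by
      have := (PySem.Int.neg_floordiv_neg_eq_iff_of_pos (a := (m : Int)) (b := lenth)
        (q := N) (by omega)).mp rfl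
      exact this
    have hNpos : 0 < N := by
      by_contra hcon
      have h3 : N * lenth ≤ 0 := by
        have := mul_le_mul_of_nonneg_right (le_of_not_gt hcon : N ≤ 0) (by omega : (0 : Int) ≤ lenth)
        simpa using this
      have h4 : (m : Int) ≤ 0 := le_trans hNb.2 h3
      omega
    have hN' : -(PySem.Int.floordiv (-((m - K : Nat) : Int)) lenth) = N - 1 := by
      by_cases hmk : m ≤ K
      · have h1 : (m - K : Nat) = 0 := by omega
        have hNone : N = 1 := by
          have h2 : (m : Int) ≤ 1 * lenth := by
            have : (m : Int) ≤ (K : Int) := by exact_mod_cast hmk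
            omega
          have := numRounds_eq lenth hl m 1 (by push_cast; omega) h2
          rw [← hN] at this; omega
        rw [h1, hNone]
        exact numRounds_eq lenth hl 0 0 (by push_cast; omega) (by push_cast; omega)
      · have hlt' : K < m := by omega
        have hcast : ((m - K : Nat) : Int) = (m : Int) - lenth := by
          have hlen2 : lenth = (K : Int) := by omega
          rw [hlen2]; push_cast [Nat.cast_sub (le_of_lt hlt')]; ring
        apply numRounds_eq lenth hl
        · rw [hcast]; nlinarith [hNb.1]
        · rw [hcast]; nlinarith [hNb.2]
    rw [hN']
    rw [PySem.List.pyRange_one_cons hNpos, List.flatMap_cons]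
    simp only [zero_add]
    congr 1
    · -- round 0 is flatMap take
      apply List.flatMap_congr
      intro row _
      rw [show (0 : Int) * lenth = ((0 : Nat) : Int) by simp,
        show (1 : Int) * lenth = ((K : Nat) : Int) by rw [one_mul]; omega,
        PySem.List.slice_natCast]
      simp
    · -- remaining rounds shift by one
      rw [PySem.List.pyRange_one 1 N, PySem.List.pyRange_one 0 (N - 1)]
      simp only [sub_zero]
      rw [List.flatMap_map, List.flatMap_map]
      apply List.flatMap_congr
      intro k _
      simp only [zero_add]
      rw [List.flatMap_map]
      apply List.flatMap_congr
      intro row _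
      simpa using slice_shift lenth hl row k

lemma sum_drop_lt (K : Nat) (hK : 1 ≤ K) (lines : List (List Int))
    (h : 0 < ((lines.map (fun row => row.drop K)).map List.length).sum) :
    ((lines.map (fun row => row.drop K)).map List.length).sum < (lines.map List.length).sum := by
  induction lines with
  | nil => simp at h
  | cons row t ih =>
    simp only [List.map_cons, List.sum_cons, List.length_drop] at *
    rcases Nat.eq_zero_or_pos ((t.map (fun row => row.drop K)).map List.length).sum with h0 | hp
    · omega
    · have := ih hp; omega

-- one unfolding of A's loop, simplified under 1 ≤ lenth
lemma loop_succ (lenth : Int) (hl : 1 ≤ lenth) (n : Nat) (lines : List (List Int)) (res : List Int) :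
    newMergeLoop lenth (n + 1) lines res =
      (if 0 < (((lines.map (fun row => row.drop lenth.toNat)).map List.length).sum) then
        newMergeLoop lenth n (lines.map (fun row => row.drop lenth.toNat))
          (res ++ lines.flatMap (fun row => row.take lenth.toNat))
      else res ++ lines.flatMap (fun row => row.take lenth.toNat)) := by
  have hf : (fun row : List Int =>
        (row.take (min lenth (row.length : Int)).toNat, row.drop (min lenth (row.length : Int)).toNat))
      = fun row : List Int => (row.take lenth.toNat, row.drop lenth.toNat) := by
    funext row
    have hmin : (min lenth (row.length : Int)).toNat = min lenth.toNat row.length := by omega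
    rw [hmin, take_min, drop_min]
  show (let pairs := lines.map (fun row =>
      (row.take (min lenth (row.length : Int)).toNat, row.drop (min lenth (row.length : Int)).toNat));
    let result := res ++ pairs.flatMap Prod.fst;
    let lines' := pairs.map Prod.snd;
    let count := (lines'.map List.length).sum;
    if 0 < count then newMergeLoop lenth n lines' result else result) = _
  simp only [hf, List.map_map, List.flatMap_map, Function.comp_def]

lemma loop_eq (lenth : Int) (hl : 1 ≤ lenth) :
    ∀ fuel (lines : List (List Int)) (res : List Int),
      (lines.map List.length).sum < fuel →
      newMergeLoop lenth fuel lines res = res ++ newMerge_alt lenth lines := by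
  intro fuel
  induction fuel with
  | zero => intro lines res h; omega
  | succ n ih =>
    intro lines res h
    rw [loop_succ lenth hl]
    set lines' := lines.map (fun row => row.drop lenth.toNat) with hlines'
    by_cases hc : 0 < ((lines'.map List.length).sum)
    · rw [if_pos hc]
      have hK : 1 ≤ lenth.toNat := by omega
      have hlt : ((lines'.map List.length).sum) < n := by
        have hsd := sum_drop_lt lenth.toNat hK lines (by rw [← hlines']; exact hc)
        rw [← hlines'] at hsd
        omega
      rw [ih lines' _ hlt, alt_step lenth hl lines, List.append_assoc]
    · rw [if_neg hc]
      rw [alt_step lenth hl lines, alt_nil_of_sum_zero lenth lines' (by omega), List.append_nil]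

-- all-empty rows (the Pre_ case that also admits lenth ≤ 0): both programs return []
lemma both_nil (lenth : Int) (lines : List (List Int)) (h : ∀ row ∈ lines, row = []) :
    newMerge lenth lines = [] ∧ newMerge_alt lenth lines = [] := by
  have hsum : (lines.map List.length).sum = 0 := by
    apply List.sum_eq_zero
    intro x hx
    rcases List.mem_map.mp hx with ⟨row, hrow, rfl⟩
    rw [h row hrow]; rfl
  constructor
  · rw [newMerge, hsum]
    show (let pairs := lines.map (fun row =>
        (row.take (min lenth (row.length : Int)).toNat, row.drop (min lenth (row.length : Int)).toNat));
      let result := [] ++ pairs.flatMap Prod.fst;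
      let lines' := pairs.map Prod.snd;
      let count := (lines'.map List.length).sum;
      if 0 < count then newMergeLoop lenth 0 lines' result else result) = []
    have hmap : lines.map (fun row =>
        (row.take (min lenth (row.length : Int)).toNat, row.drop (min lenth (row.length : Int)).toNat))
        = lines.map (fun _ => (([] : List Int), ([] : List Int))) := by
      apply List.map_congr_left
      intro row hrow
      rw [h row hrow]; simp
    simp only [hmap, List.map_map, List.flatMap_map, Function.comp_def]
    simp
  · exact alt_nil_of_sum_zero lenth lines hsum

-- ===== VERDICT (by name: the statement is the Claim_ definition above) =====
theorem newMerge_spec : Claim_equal_newMerge := by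
  intro lenth lines _ hpre
  unfold Spec_newMerge
  rcases hpre with hl | hempty
  · rw [newMerge, loop_eq lenth hl _ lines [] (by omega), List.nil_append]
  · rcases both_nil lenth lines hempty with ⟨h1, h2⟩
    rw [h1, h2]
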